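-- pv_equiv track=rewrite | github.com/YangliuF95/Method_embedding | code/preprocessing.py | phrase_combination
-- ===== SOURCE A (Python) =====
-- import itertools
--
-- def phrase_combination(a):
--     ls=[]
--     if len(a.split(' '))>1:
--         a=' '+a+' '
--         for i in range(len(a.split(' '))):
--             if i<len(a.split(' '))-1:
--                 ls.append([a.split(' ')[i]+'-',a.split(' ')[i]+' '])
--             else:
--                 ls.append([a.split(' ')[i]])
--         ls=[''.join(list(i)) for i in list(itertools.product(*ls))]
--     else:
--         ls=[a]
--     return ls
-- ===== SOURCE B (Python) =====
-- def phrase_combination(a):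
--     words = a.split(' ')
--     n = len(words)
--     if n <= 1:
--         return [a]
--     m = n + 1
--     out = []
--     for k in range(2 ** m):
--         s = ''
--         for j in range(m):
--             s += '-' if ((k >> (m - 1 - j)) & 1) == 0 else ' '
--             if j < n:
--                 s += words[j]
--         out.append(s)
--     return out
-- ===== Notes on version B (the rewrite author's own statement) =====
-- stated objective: alternative
-- what changed: B splits the string once and enumerates the 2^(n+1) separator choices by binary counting (bit j of k picks '-' or ' '), building each result directly, instead of A's repeated re-splitting of the padded string and itertools.product over per-slot choice lists.
import Mathlib
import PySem

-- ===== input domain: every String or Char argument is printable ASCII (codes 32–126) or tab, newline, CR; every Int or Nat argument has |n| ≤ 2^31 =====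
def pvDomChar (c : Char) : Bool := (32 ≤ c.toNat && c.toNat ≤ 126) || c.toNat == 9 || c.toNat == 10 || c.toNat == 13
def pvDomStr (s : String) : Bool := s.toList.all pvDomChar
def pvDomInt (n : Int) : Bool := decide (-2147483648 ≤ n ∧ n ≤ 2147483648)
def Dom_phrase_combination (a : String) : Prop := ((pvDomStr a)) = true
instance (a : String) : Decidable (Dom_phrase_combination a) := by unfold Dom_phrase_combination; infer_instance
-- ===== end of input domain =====

-- B replaces A's repeated re-splitting + itertools.product with one split and a binary-counting
-- loop that builds each combination directly (objective: alternative decomposition, same output order).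
-- Python string concatenation is ported as list append on .toList (exact for all strings).

-- ===== PORT A =====
-- ls starts as []; `a = ' '+a+' '` is the padded character list; each `a.split(' ')` is re-evaluated
-- as in the source; `a.split(' ')[i]` is PySem.List.pyGetD (i is a range index, always in range).
def phrase_combination (a : String) : List String :=
  if (PySem.Chars.splitOn a.toList [' ']).length > 1 then
    let a2 : List Char := [' '] ++ a.toList ++ [' ']
    let ls : List (List (List Char)) :=
      (List.range (PySem.Chars.splitOn a2 [' ']).length).foldl (fun ls i =>
        if i < (PySem.Chars.splitOn a2 [' ']).length - 1 then
          ls ++ [[PySem.List.pyGetD (PySem.Chars.splitOn a2 [' ']) (i : Int) [] ++ ['-'],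
                  PySem.List.pyGetD (PySem.Chars.splitOn a2 [' ']) (i : Int) [] ++ [' ']]]
        else
          ls ++ [[PySem.List.pyGetD (PySem.Chars.splitOn a2 [' ']) (i : Int) []]]) []
    -- ls = [''.join(list(i)) for i in list(itertools.product(*ls))]
    let prod : List (List (List Char)) :=
      ls.foldr (fun choices acc => choices.flatMap (fun c => acc.map (c :: ·))) [[]]
    prod.map (fun parts => String.ofList (PySem.Chars.join [] parts))
  else [a]

-- ===== PORT B =====
def phrase_combination_alt (a : String) : List String :=
  let words := PySem.Chars.splitOn a.toList [' ']
  let n := words.length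
  if n ≤ 1 then [a]
  else
    let m := n + 1
    (List.range (2 ^ m)).foldl (fun out k =>
      out ++ [String.ofList ((List.range m).foldl (fun s j =>
        let s := s ++ (if (k >>> (m - 1 - j)) &&& 1 = 0 then ['-'] else [' '])
        if j < n then s ++ PySem.List.pyGetD words (j : Int) [] else s) [])]) []

-- ===== PRECONDITION & SPEC =====
def Spec_phrase_combination (a : String) (out : List String) : Prop := out = phrase_combination_alt a
instance (a : String) (out : List String) : Decidable (Spec_phrase_combination a out) := by unfold Spec_phrase_combination; infer_instance

-- ===== CLAIM (what is proved, stated in full; the proofs are below) =====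
def Claim_equal_phrase_combination : Prop := ∀ (a : String), Dom_phrase_combination a → Spec_phrase_combination a (phrase_combination a)

-- ===== LEMMAS AND PROOFS =====

-- simple recursive model of Python's s.split(sep) for a one-character sep
def mysplit (c : Char) : List Char → List (List Char)
  | [] => [[]]
  | x :: rest =>
      if x = c then [] :: mysplit c rest
      else
        match mysplit c rest with
        | [] => [[x]]
        | h :: t => (x :: h) :: t

theorem mysplit_ne_nil (c : Char) (l : List Char) : mysplit c l ≠ [] := by
  cases l with
  | nil => simp [mysplit]
  | cons x rest =>
    simp only [mysplit]
    split
    · simp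
    · split <;> simp

theorem splitOn_go_eq (c : Char) :
    ∀ (fuel : Nat) (l cur : List Char) (acc : List (List Char)),
      l.length < fuel → ∀ h t, mysplit c l = h :: t →
      PySem.Chars.splitOn.go [c] fuel l cur acc = acc.reverse ++ (cur.reverse ++ h) :: t := by
  intro fuel
  induction fuel with
  | zero => intro l cur acc hf; omega
  | succ fuel ih =>
    intro l cur acc hf h t hm
    cases l with
    | nil =>
      simp [mysplit] at hm
      simp [PySem.Chars.splitOn.go, hm.1, ← hm.2]
    | cons x rest =>
      by_cases hx : x = c
      · subst hx
        rw [mysplit, if_pos rfl] at hm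
        obtain ⟨h1, h2⟩ := List.cons.inj hm
        obtain ⟨h', t', hm'⟩ := List.exists_cons_of_ne_nil (mysplit_ne_nil x rest)
        simp only [PySem.Chars.splitOn.go]
        rw [if_pos (by simp [List.isPrefixOf])]
        simp only [List.length_cons, List.drop_succ_cons, List.length_nil, List.drop_zero]
        rw [ih rest [] (cur.reverse :: acc) (by simp at hf ⊢; omega) h' t' hm']
        simp [← h1, ← h2, hm']
      · rw [mysplit, if_neg hx] at hm
        obtain ⟨h', t', hm'⟩ := List.exists_cons_of_ne_nil (mysplit_ne_nil c rest)
        rw [hm'] at hm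
        obtain ⟨h1, h2⟩ := List.cons.inj hm
        simp only [PySem.Chars.splitOn.go]
        rw [if_neg (by simp [List.isPrefixOf]; exact fun hc => hx hc.symm)]
        rw [ih rest (x :: cur) acc (by simp at hf ⊢; omega) h' t' hm']
        simp [← h1, ← h2]

theorem splitOn_eq_mysplit (c : Char) (l : List Char) :
    PySem.Chars.splitOn l [c] = mysplit c l := by
  obtain ⟨h, t, hm⟩ := List.exists_cons_of_ne_nil (mysplit_ne_nil c l)
  unfold PySem.Chars.splitOn
  rw [splitOn_go_eq c (l.length + 1) l [] [] (by omega) h t hm, hm]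
  simp

theorem mysplit_append_self (c : Char) (l : List Char) :
    mysplit c (l ++ [c]) = mysplit c l ++ [[]] := by
  induction l with
  | nil => simp [mysplit]
  | cons x rest ih =>
    by_cases hx : x = c
    · subst hx; simp [mysplit, ih]
    · obtain ⟨h, t, hm⟩ := List.exists_cons_of_ne_nil (mysplit_ne_nil c rest)
      simp only [List.cons_append, mysplit, if_neg hx, ih, hm]

theorem splitOn_pad (cs : List Char) :
    PySem.Chars.splitOn ([' '] ++ cs ++ [' ']) [' ']
      = [] :: PySem.Chars.splitOn cs [' '] ++ [[]] := by
  rw [splitOn_eq_mysplit, splitOn_eq_mysplit]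
  show mysplit ' ' (' ' :: (cs ++ [' '])) = _
  rw [mysplit, if_pos rfl, mysplit_append_self]
  simp

-- the separator chosen by bit j of k (slot 0 = highest bit)
def selC (m k j : Nat) : List Char := if (k >>> (m - 1 - j)) % 2 = 0 then ['-'] else [' ']

-- the k-th combination: each word followed by its separator (the head word is empty at use)
def istr : List (List Char) → Nat → List Char
  | [], _ => []
  | wi :: rest, k =>
      wi ++ (if (k >>> rest.length) % 2 = 0 then ['-'] else [' ']) ++ istr rest (k % 2 ^ rest.length)

-- structural form of A's itertools.product over the choice lists
def combR : List (List Char) → List (List (List Char))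
  | [] => [[[]]]
  | wi :: rest => (combR rest).map ((wi ++ ['-']) :: ·) ++ (combR rest).map ((wi ++ [' ']) :: ·)

theorem bit_mod_pow (t m k : Nat) (h : t < m) : ((k % 2 ^ m) >>> t) % 2 = (k >>> t) % 2 := by
  simp only [Nat.shiftRight_eq_div_pow]
  have hm : 2 ^ m = 2 ^ t * 2 ^ (m - t) := by rw [← pow_add]; congr 1; omega
  have e : k = 2 ^ t * (2 ^ (m - t) * (k / 2 ^ m)) + k % 2 ^ m := by
    rw [← Nat.mul_assoc, ← hm]; exact (Nat.div_add_mod k (2^m)).symm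
  conv_rhs => rw [e]
  rw [Nat.mul_add_div (Nat.pow_pos (by norm_num))]
  obtain ⟨x, hx⟩ : 2 ∣ 2 ^ (m - t) * (k / 2 ^ m) := Dvd.dvd.mul_right (dvd_pow_self 2 (by omega)) _
  rw [hx]; omega

theorem istr_flatMap (u : List (List Char)) (k : Nat) :
    istr u k = (List.range u.length).flatMap (fun j => u.getD j [] ++ selC u.length k j) := by
  induction u generalizing k with
  | nil => simp [istr]
  | cons wi rest ih =>
    simp only [istr, List.length_cons]
    rw [List.range_succ_eq_map]
    simp only [List.flatMap_cons, List.flatMap_map]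
    have hsel0 : selC (rest.length + 1) k 0
        = if (k >>> rest.length) % 2 = 0 then ['-'] else [' '] := by simp [selC]
    have hrec : (List.range rest.length).flatMap
          (fun x => (fun j => (wi :: rest).getD j [] ++ selC (rest.length + 1) k j) (x + 1))
        = (List.range rest.length).flatMap
          (fun j => rest.getD j [] ++ selC rest.length (k % 2 ^ rest.length) j) := by
      apply List.flatMap_congr
      intro j hj
      rw [List.mem_range] at hj
      simp only [List.getD_cons_succ]
      congr 1
      simp only [selC]
      rw [show rest.length + 1 - 1 - (j + 1) = rest.length - 1 - j by omega]
      rw [bit_mod_pow (rest.length - 1 - j) rest.length k (by omega)]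
    rw [hrec, ← ih (k % 2 ^ rest.length), hsel0]
    simp

theorem combR_flatten (u : List (List Char)) :
    (combR u).map List.flatten = (List.range (2 ^ u.length)).map (istr u) := by
  induction u with
  | nil => simp [combR, istr]
  | cons wi rest ih =>
    simp only [combR, List.length_cons, List.map_append, List.map_map]
    have h1 : (List.flatten ∘ fun p => (wi ++ ['-']) :: p)
        = (fun p => wi ++ ['-'] ++ p.flatten) := by funext p; simp
    have h2 : (List.flatten ∘ fun p => (wi ++ [' ']) :: p)
        = (fun p => wi ++ [' '] ++ p.flatten) := by funext p; simp
    rw [h1, h2]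
    have e1 : (combR rest).map (fun p => wi ++ ['-'] ++ p.flatten)
        = ((combR rest).map List.flatten).map (fun q => wi ++ ['-'] ++ q) := by
      simp [List.map_map, Function.comp]
    have e2 : (combR rest).map (fun p => wi ++ [' '] ++ p.flatten)
        = ((combR rest).map List.flatten).map (fun q => wi ++ [' '] ++ q) := by
      simp [List.map_map, Function.comp]
    rw [e1, e2, ih, List.map_map, List.map_map]
    have hpow : 2 ^ (rest.length + 1) = 2 ^ rest.length + 2 ^ rest.length := by ring
    rw [hpow, List.range_add, List.map_append, List.map_map]
    congr 1
    · apply List.map_congr_left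
      intro k hk
      rw [List.mem_range] at hk
      simp only [Function.comp, istr]
      rw [Nat.shiftRight_eq_div_pow, Nat.div_eq_of_lt hk, Nat.mod_eq_of_lt hk]
      simp
    · apply List.map_congr_left
      intro k hk
      rw [List.mem_range] at hk
      simp only [Function.comp, istr]
      have hs : ((2 ^ rest.length + k) >>> rest.length) % 2 = 1 := by
        rw [Nat.shiftRight_eq_div_pow]
        rw [show 2 ^ rest.length + k = k + 1 * 2 ^ rest.length by ring]
        rw [Nat.add_mul_div_right _ _ (Nat.pow_pos (by norm_num) : (0:ℕ) < 2 ^ rest.length),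
          Nat.div_eq_of_lt hk]
      have hmod : (2 ^ rest.length + k) % 2 ^ rest.length = k := by
        rw [Nat.add_mod_left, Nat.mod_eq_of_lt hk]
      rw [hs, hmod]
      simp

theorem flatMap_shift (n : Nat) (w s : Nat → List Char) :
    (List.range (n + 1)).flatMap (fun j => s j ++ if j < n then w j else [])
      = s 0 ++ (List.range n).flatMap (fun j => w j ++ s (j + 1)) := by
  induction n generalizing w s with
  | zero => simp
  | succ n ih =>
    rw [List.range_succ_eq_map]
    simp only [List.flatMap_cons, List.flatMap_map, Nat.succ_eq_add_one]
    rw [show (fun x => (fun j => s j ++ if j < n + 1 then w j else []) (x + 1))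
        = (fun j => s (j + 1) ++ if j < n then w (j + 1) else []) from by funext j; simp]
    rw [ih (fun j => w (j + 1)) (fun j => s (j + 1))]
    conv_rhs => rw [List.range_succ_eq_map]
    simp [List.flatMap_map, List.append_assoc]

theorem map_range_getD {α β : Type} (u : List α) (d : α) (f : α → β) :
    (List.range u.length).map (fun i => f (u.getD i d)) = u.map f := by
  apply List.ext_getElem
  · simp
  · intro i h1 h2
    simp at h1 ⊢
    simp [List.getElem?_eq_getElem (by simpa using h1)]

theorem join_nil_sep (ps : List (List Char)) : PySem.Chars.join [] ps = ps.flatten := by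
  simp only [PySem.Chars.join, List.intercalate]
  induction ps with
  | nil => simp
  | cons h t ih => cases t <;> simp_all [List.intersperse]

-- A's foldr over the choice lists is combR
theorem foldr_choice_eq_combR (u : List (List Char)) :
    u.foldr (fun wi acc => [wi ++ ['-'], wi ++ [' ']].flatMap (fun c => acc.map (c :: ·)))
        [[[]]]
      = combR u := by
  induction u with
  | nil => simp [combR]
  | cons wi rest ih => rw [List.foldr_cons, ih]; simp [combR]

-- A's ls-building loop, for the padded word list u ++ [[]]
theorem A_ls (u : List (List Char)) :
    (List.range (u ++ [[]] : List (List Char)).length).foldl (fun ls i =>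
        if i < (u ++ [[]] : List (List Char)).length - 1 then
          ls ++ [[PySem.List.pyGetD (u ++ [[]]) (i : Int) [] ++ ['-'],
                  PySem.List.pyGetD (u ++ [[]]) (i : Int) [] ++ [' ']]]
        else
          ls ++ [[PySem.List.pyGetD (u ++ [[]]) (i : Int) []]]) []
      = u.map (fun wi => [wi ++ ['-'], wi ++ [' ']]) ++ [[([] : List Char)]] := by
  have hlen : (u ++ [[]] : List (List Char)).length = u.length + 1 := by simp
  rw [List.foldl_ext _ (fun ls i => ls ++
      [if i < u.length then
        [PySem.List.pyGetD (u ++ [[]]) (i : Int) [] ++ ['-'],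
         PySem.List.pyGetD (u ++ [[]]) (i : Int) [] ++ [' ']]
       else [PySem.List.pyGetD (u ++ [[]]) (i : Int) []]])
      _ (by intro ls i _; rw [hlen]; simp only [Nat.add_sub_cancel]; split <;> rfl)]
  rw [PySem.List.foldl_append_singleton_eq_map, hlen, List.range_succ, List.map_append]
  have hlast : (List.map (fun i =>
      if i < u.length then
        [PySem.List.pyGetD (u ++ [[]]) (i : Int) [] ++ ['-'],
         PySem.List.pyGetD (u ++ [[]]) (i : Int) [] ++ [' ']]
      else [PySem.List.pyGetD (u ++ [[]]) (i : Int) []]) [u.length])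
      = [[([] : List Char)]] := by
    simp
  have hpre : (List.map (fun i =>
      if i < u.length then
        [PySem.List.pyGetD (u ++ [[]]) (i : Int) [] ++ ['-'],
         PySem.List.pyGetD (u ++ [[]]) (i : Int) [] ++ [' ']]
      else [PySem.List.pyGetD (u ++ [[]]) (i : Int) []]) (List.range u.length))
      = u.map (fun wi => [wi ++ ['-'], wi ++ [' ']]) := by
    rw [List.map_congr_left (g := fun i => [u.getD i [] ++ ['-'], u.getD i [] ++ [' ']])
      (fun i hi => by
        rw [List.mem_range] at hi
        rw [if_pos hi]
        simp only [PySem.List.pyGetD_natCast]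
        rw [show (u ++ [[]] : List (List Char)).getD i [] = u.getD i [] by
          simp [List.getD_eq_getElem?_getD, List.getElem?_append_left hi]])]
    exact map_range_getD u [] (fun wi => [wi ++ ['-'], wi ++ [' ']])
  rw [hlast, hpre]
  simp

-- B's inner loop builds exactly the k-th combination istr ([] :: W) k
theorem B_inner (W : List (List Char)) (k : Nat) :
    (List.range (W.length + 1)).foldl (fun s j =>
        let s' := s ++ (if (k >>> (W.length + 1 - 1 - j)) &&& 1 = 0 then ['-'] else [' '])
        if j < W.length then s' ++ PySem.List.pyGetD W (j : Int) [] else s') []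
      = istr ([] :: W) k := by
  rw [List.foldl_ext _ (fun s j => s ++
      (selC (W.length + 1) k j ++ if j < W.length then W.getD j [] else []))
      _ (by
        intro s j _
        simp only [selC, Nat.and_one_is_mod, Nat.add_sub_cancel, PySem.List.pyGetD_natCast]
        split <;> simp [List.append_assoc])]
  rw [PySem.List.foldl_append_eq_flatMap, flatMap_shift W.length (fun j => W.getD j [])
    (fun j => selC (W.length + 1) k j)]
  rw [istr_flatMap ([] :: W) k]
  rw [show ([] :: W : List (List Char)).length = W.length + 1 by simp]
  rw [List.range_succ_eq_map]
  simp only [List.flatMap_cons, List.flatMap_map, List.getD_cons_zero, List.getD_cons_succ,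
    List.nil_append]

-- ===== VERDICT (by name: the statement is the Claim_ definition above) =====
theorem phrase_combination_spec : Claim_equal_phrase_combination := by
  intro a _
  unfold Spec_phrase_combination phrase_combination phrase_combination_alt
  set W := PySem.Chars.splitOn a.toList [' '] with hW
  by_cases hn : W.length > 1
  case neg =>
    rw [if_neg hn, if_pos (by omega)]
  case pos =>
    rw [if_pos hn, if_neg (by omega)]
    simp only [splitOn_pad a.toList, ← hW]
    rw [show ([] :: W ++ [[]] : List (List Char)) = (([] :: W) ++ [[]] : List (List Char)) from rfl]
    rw [A_ls ([] :: W)]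
    rw [List.foldr_append]
    rw [show List.foldr (fun choices acc => choices.flatMap (fun c => acc.map (c :: ·)))
        ([[]] : List (List (List Char))) [[([] : List Char)]]
        = ([[[]]] : List (List (List Char))) from rfl]
    rw [List.foldr_map (f := fun wi => [wi ++ ['-'], wi ++ [' ']])]
    rw [foldr_choice_eq_combR ([] :: W)]
    rw [show (fun parts => String.ofList (PySem.Chars.join [] parts))
        = (fun parts : List (List Char) => String.ofList parts.flatten) from by
          funext parts; rw [join_nil_sep]]
    rw [show (fun parts : List (List Char) => String.ofList parts.flatten)
        = (String.ofList ∘ List.flatten) from rfl]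
    rw [← List.map_map (g := String.ofList) (f := List.flatten), combR_flatten ([] :: W)]
    rw [show ([] :: W : List (List Char)).length = W.length + 1 from by simp]
    rw [PySem.List.foldl_append_singleton_eq_map, List.map_map]
    rw [List.nil_append]
    apply List.map_congr_left
    intro k _
    simp only [Function.comp]
    rw [B_inner W k]
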